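-- pv_equiv track=rewrite | github.com/randomraiderttu/aoc2021 | day3/day3.py | calculateGammaAndEpsilon
-- ===== SOURCE A (Python) =====
-- def calculateGammaAndEpsilon(input):
--     """Given a 2-D list of binary numbers, calculate and return the binary Gamma value
--
--     Args:
--         input (list): 2-D list of binary numbers, each digit in the binary list
--     """
--     nums = len(input[0])
--     result = []
--     gammaList = []
--     epsilonList = []
--     gamma = ""
--     epsilon = ""
--
--     # Create the array to hold the aggregate values by position
--     for i in range(nums):
--         result.append({'0': 0, '1': 0})
--
--     for x in input:
--         for key, value in enumerate(x):
--             if value == '0':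
--                 result[key]['0'] += 1
--             elif value == '1':
--                 result[key]['1'] += 1
--
--     for t in result:
--         if t['0'] > t['1']:
--             gammaList.append('0')
--             epsilonList.append('1')
--         else:
--             gammaList.append('1')
--             epsilonList.append('0')
--
--     gamma = gamma.join(gammaList)
--     epsilon = epsilon.join(epsilonList)
--
--     return gamma, epsilon
-- ===== SOURCE B (Python) =====
-- def calculateGammaAndEpsilon(input):
--     """Column-major re-implementation: count '0'/'1' per column directly."""
--     n = len(input[0])
--     gbits = ['0' if sum(1 for row in input if i < len(row) and row[i] == '0')
--                   > sum(1 for row in input if i < len(row) and row[i] == '1')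
--              else '1'
--              for i in range(n)]
--     gamma = ''.join(gbits)
--     epsilon = ''.join('1' if b == '0' else '0' for b in gbits)
--     return gamma, epsilon
-- ===== Notes on version B (the rewrite author's own statement) =====
-- stated objective: simpler
-- what changed: Replaces A's row-major pass that mutates a list of per-position {'0','1'} counter dicts (plus a second pass over the dicts) with a direct column-major count per bit position, building the gamma bits in one comprehension and epsilon as their flips.
import Mathlib
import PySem

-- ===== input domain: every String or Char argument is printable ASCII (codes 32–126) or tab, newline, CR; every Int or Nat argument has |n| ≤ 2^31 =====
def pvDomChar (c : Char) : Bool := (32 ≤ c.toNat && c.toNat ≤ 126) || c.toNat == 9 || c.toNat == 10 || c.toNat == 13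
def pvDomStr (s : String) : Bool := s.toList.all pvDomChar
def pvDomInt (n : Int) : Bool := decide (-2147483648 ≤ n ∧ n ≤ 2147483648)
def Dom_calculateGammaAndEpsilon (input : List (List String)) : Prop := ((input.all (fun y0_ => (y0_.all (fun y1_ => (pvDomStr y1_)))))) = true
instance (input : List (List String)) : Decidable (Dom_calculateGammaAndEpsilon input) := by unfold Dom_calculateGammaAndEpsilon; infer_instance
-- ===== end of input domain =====

-- B replaces A's row-major dict-accumulation (a list of per-position {'0','1'} counters updated
-- row by row) with a direct column-major count per position; objective: simpler.

-- ===== PORT A =====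
-- result[key][c] += 1 : Python raises IndexError when key ≥ len(result); those inputs are
-- excluded by Pre_ (Lean's List.modify is a no-op there). The dict read t['0'] / the +=-read
-- always find their key (every dict is created with both keys), so getD/modify are exact.
def pvUpdA (res : List (PySem.Dict String Int)) (kv : Int × String) : List (PySem.Dict String Int) :=
  if kv.2 == "0" then res.modify kv.1.toNat (fun d => d.modify "0" 0 (· + 1))
  else if kv.2 == "1" then res.modify kv.1.toNat (fun d => d.modify "1" 0 (· + 1))
  else res

def calculateGammaAndEpsilon (input : List (List String)) : String × String :=
  let nums := (input.headD []).length
  let result : List (PySem.Dict String Int) :=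
    (PySem.List.pyRange 0 (nums : Int)).foldl
      (fun acc _ => acc ++ [PySem.Dict.ofList [("0", (0 : Int)), ("1", 0)]]) []
  let result := input.foldl (fun res x => (PySem.List.enumerate x 0).foldl pvUpdA res) result
  let p := result.foldl
      (fun (p : List String × List String) t =>
        if t.getD "0" 0 > t.getD "1" 0 then (p.1 ++ ["0"], p.2 ++ ["1"])
        else (p.1 ++ ["1"], p.2 ++ ["0"])) ([], [])
  (PySem.Str.join "" p.1, PySem.Str.join "" p.2)

-- ===== PORT B =====
-- sum(1 for row in input if i < len(row) and row[i] == c)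
def pvColCount (input : List (List String)) (i : Nat) (c : String) : Int :=
  (input.countP (fun row => decide (i < row.length) && (row.getD i "" == c)) : Int)

def calculateGammaAndEpsilon_alt (input : List (List String)) : String × String :=
  let n := (input.headD []).length
  let gbits := (List.range n).map (fun i =>
    if pvColCount input i "0" > pvColCount input i "1" then "0" else "1")
  (PySem.Str.join "" gbits,
   PySem.Str.join "" (gbits.map (fun b => if b == "0" then "1" else "0")))

-- ===== PRECONDITION & SPEC =====
-- Pre_ excludes exactly the inputs on which Python A raises IndexError: the empty list
-- (input[0]) and inputs where some row has a '0'/'1' cell at a column index ≥ len(input[0])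
-- (then result[key] is out of range).
def Pre_calculateGammaAndEpsilon (input : List (List String)) : Prop :=
  input ≠ [] ∧ ∀ row ∈ input,
    ((row.drop (input.headD []).length).all (fun s => (s != "0") && (s != "1"))) = true
instance (input : List (List String)) : Decidable (Pre_calculateGammaAndEpsilon input) := by
  unfold Pre_calculateGammaAndEpsilon; infer_instance

def pvWitness_calculateGammaAndEpsilon : List (List String) := [["1", "0"], ["0", "0"]]

def Spec_calculateGammaAndEpsilon (input : List (List String)) (out : String × String) : Prop := out = calculateGammaAndEpsilon_alt input
instance (input : List (List String)) (out : String × String) : Decidable (Spec_calculateGammaAndEpsilon input out) := by unfold Spec_calculateGammaAndEpsilon; infer_instance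

-- ===== CLAIM (what is proved, stated in full; the proofs are below) =====
def Claim_equal_calculateGammaAndEpsilon : Prop := ∀ (input : List (List String)), Dom_calculateGammaAndEpsilon input → Pre_calculateGammaAndEpsilon input → Spec_calculateGammaAndEpsilon input (calculateGammaAndEpsilon input)

-- ===== LEMMAS AND PROOFS =====

-- the effect of one cell value on one counter dict
def pvApply (v : String) (d : PySem.Dict String Int) : PySem.Dict String Int :=
  if v == "0" then d.modify "0" 0 (· + 1)
  else if v == "1" then d.modify "1" 0 (· + 1) else d

-- the effect of one whole row on the counter dict of column j
def pvRowUpd (j : Nat) (d : PySem.Dict String Int) (row : List String) : PySem.Dict String Int :=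
  if j < row.length then pvApply (row.getD j "") d else d

lemma pvUpdA_getElem? (res : List (PySem.Dict String Int)) (s : Nat) (v : String) (j : Nat) :
    (pvUpdA res ((s : Int), v))[j]? =
      if s = j then res[j]?.map (pvApply v) else res[j]? := by
  unfold pvUpdA pvApply
  by_cases hj : s = j <;> by_cases h0 : v == "0" <;> by_cases h1 : v == "1" <;>
    simp only [hj, h0, h1, if_false, Bool.false_eq_true, if_pos,
      Int.toNat_natCast, List.getElem?_modify] <;>
    cases res[j]? <;> simp_all

lemma rowFold_getElem? (x : List String) : ∀ (s : Nat) (res : List (PySem.Dict String Int)) (j : Nat),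
    ((PySem.List.enumerate x (s : Int)).foldl pvUpdA res)[j]? =
      if s ≤ j ∧ j < s + x.length then res[j]?.map (pvApply (x.getD (j - s) "")) else res[j]? := by
  induction x with
  | nil =>
    intro s res j
    rw [PySem.List.enumerate_nil, List.foldl_nil,
      if_neg (by simp only [List.length_nil]; omega)]
  | cons v rest ih =>
    intro s res j
    rw [PySem.List.enumerate_cons, List.foldl_cons,
      show (s : Int) + 1 = ((s + 1 : Nat) : Int) by push_cast; ring, ih (s + 1)]
    by_cases hj : j = s
    · subst hj
      rw [if_neg (by omega), if_pos (by simp only [List.length_cons]; omega),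
        pvUpdA_getElem?, if_pos rfl]
      simp
    · rw [pvUpdA_getElem?, if_neg (by omega : ¬ s = j)]
      by_cases hin : s + 1 ≤ j ∧ j < s + 1 + rest.length
      · rw [if_pos hin, if_pos (by simp only [List.length_cons]; omega),
          show j - s = (j - (s + 1)) + 1 by omega, List.getD_cons_succ]
      · rw [if_neg hin, if_neg (by simp only [List.length_cons]; omega)]

lemma rowFold0_getElem? (x : List String) (res : List (PySem.Dict String Int)) (j : Nat) :
    ((PySem.List.enumerate x 0).foldl pvUpdA res)[j]? =
      if j < x.length then res[j]?.map (pvApply (x.getD j "")) else res[j]? := by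
  have h := rowFold_getElem? x 0 res j
  simpa using h

lemma outerFold_getElem? (rows : List (List String)) : ∀ (res : List (PySem.Dict String Int)) (j : Nat),
    ((rows.foldl (fun res x => (PySem.List.enumerate x 0).foldl pvUpdA res) res)[j]?) =
      res[j]?.map (fun d => rows.foldl (pvRowUpd j) d) := by
  induction rows with
  | nil => intro res j; cases h : res[j]? <;> simp [h]
  | cons x rest ih =>
    intro res j
    rw [List.foldl_cons, ih, rowFold0_getElem? x res j]
    simp only [List.foldl_cons]
    by_cases hj : j < x.length
    · cases h : res[j]? <;> simp [pvRowUpd, hj]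
    · cases h : res[j]? <;> simp [pvRowUpd, hj]

lemma dict_modify_zero (a b : Int) :
    (PySem.Dict.mk [("0", a), ("1", b)]).modify "0" 0 (· + 1) = PySem.Dict.mk [("0", a + 1), ("1", b)] := by
  simp [PySem.Dict.modify, PySem.Dict.insert, PySem.Dict.getD, PySem.Dict.get?]
lemma dict_modify_one (a b : Int) :
    (PySem.Dict.mk [("0", a), ("1", b)]).modify "1" 0 (· + 1) = PySem.Dict.mk [("0", a), ("1", b + 1)] := by
  simp [PySem.Dict.modify, PySem.Dict.insert, PySem.Dict.getD, PySem.Dict.get?]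

lemma dictFold (j : Nat) (rows : List (List String)) : ∀ (a b : Int),
    rows.foldl (pvRowUpd j) (PySem.Dict.mk [("0", a), ("1", b)]) =
      PySem.Dict.mk
        [("0", a + (rows.countP (fun row => decide (j < row.length) && (row.getD j "" == "0")) : Int)),
         ("1", b + (rows.countP (fun row => decide (j < row.length) && (row.getD j "" == "1")) : Int))] := by
  induction rows with
  | nil => intro a b; simp
  | cons row rest ih =>
    intro a b
    have hstep : pvRowUpd j (PySem.Dict.mk [("0", a), ("1", b)]) row =
        PySem.Dict.mk
          [("0", a + (if decide (j < row.length) && (row.getD j "" == "0") then (1:Int) else 0)),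
           ("1", b + (if decide (j < row.length) && (row.getD j "" == "1") then (1:Int) else 0))] := by
      unfold pvRowUpd pvApply
      by_cases hl : j < row.length
      · rw [if_pos hl]
        simp only [decide_eq_true hl, Bool.true_and]
        by_cases h0 : row.getD j "" = "0"
        · rw [h0]
          simp [dict_modify_zero]
        · by_cases h1 : row.getD j "" = "1"
          · rw [h1]
            simp [dict_modify_one]
          · simp only [beq_iff_eq, h0, h1]
            simp
      · simp [hl]
    rw [List.foldl_cons, hstep, ih]
    simp only [List.countP_cons]
    push_cast
    ring_nf

lemma dict_getD_zero (a b : Int) : (PySem.Dict.mk [("0", a), ("1", b)]).getD "0" 0 = a := by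
  simp [PySem.Dict.getD, PySem.Dict.get?]

lemma dict_getD_one (a b : Int) : (PySem.Dict.mk [("0", a), ("1", b)]).getD "1" 0 = b := by
  simp [PySem.Dict.getD, PySem.Dict.get?]

lemma pairFold (ts : List (PySem.Dict String Int)) : ∀ (gl el : List String),
    ts.foldl
        (fun (p : List String × List String) t =>
          if t.getD "0" 0 > t.getD "1" 0 then (p.1 ++ ["0"], p.2 ++ ["1"])
          else (p.1 ++ ["1"], p.2 ++ ["0"])) (gl, el) =
      (gl ++ ts.map (fun t => if t.getD "0" 0 > t.getD "1" 0 then "0" else "1"),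
       el ++ ts.map (fun t => if t.getD "0" 0 > t.getD "1" 0 then "1" else "0")) := by
  induction ts with
  | nil => simp
  | cons t rest ih =>
    intro gl el
    rw [List.foldl_cons]
    by_cases h : t.getD "0" 0 > t.getD "1" 0 <;> simp [h, ih]

-- A's counter list equals the column-count dicts of B's counting scheme
lemma resultA_eq (input : List (List String)) :
    (input.foldl (fun res x => (PySem.List.enumerate x 0).foldl pvUpdA res)
        ((PySem.List.pyRange 0 (((input.headD []).length : Nat) : Int)).foldl
          (fun acc _ => acc ++ [PySem.Dict.ofList [("0", (0 : Int)), ("1", 0)]]) [])) =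
      (List.range (input.headD []).length).map
        (fun j => PySem.Dict.mk [("0", pvColCount input j "0"), ("1", pvColCount input j "1")]) := by
  have hinit : (PySem.List.pyRange 0 (((input.headD []).length : Nat) : Int)).foldl
      (fun acc _ => acc ++ [PySem.Dict.ofList [("0", (0 : Int)), ("1", 0)]]) [] =
      (List.range (input.headD []).length).map
        (fun _ => PySem.Dict.mk [("0", (0 : Int)), ("1", 0)]) := by
    rw [PySem.List.foldl_append_singleton_eq_map (fun _ => PySem.Dict.ofList [("0", (0:Int)), ("1", 0)]),
      List.nil_append, PySem.List.pyRange_zero_natCast, List.map_map]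
    rfl
  rw [hinit]
  apply List.ext_getElem?
  intro j
  rw [outerFold_getElem?]
  simp only [List.getElem?_map]
  by_cases hj : j < (input.headD []).length
  · simp only [List.getElem?_range, hj, Option.map_some]
    rw [dictFold j input 0 0]
    simp [pvColCount]
  · have hn : (List.range (input.headD []).length)[j]? = none :=
      List.getElem?_eq_none (by simpa using hj)
    rw [hn]
    simp

-- ===== VERDICT (by name: the statement is the Claim_ definition above) =====
theorem calculateGammaAndEpsilon_spec : Claim_equal_calculateGammaAndEpsilon := by
  intro input _ _
  unfold Spec_calculateGammaAndEpsilon calculateGammaAndEpsilon calculateGammaAndEpsilon_alt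
  simp only []
  rw [resultA_eq, pairFold, List.nil_append, List.nil_append]
  simp only [List.map_map, Prod.mk.injEq]
  constructor
  · refine congrArg (PySem.Str.join "") (List.map_congr_left ?_)
    intro j _
    simp [Function.comp, dict_getD_zero, dict_getD_one]
  · refine congrArg (PySem.Str.join "") (List.map_congr_left ?_)
    intro j _
    by_cases h : pvColCount input j "0" > pvColCount input j "1" <;>
      simp [Function.comp, dict_getD_zero, dict_getD_one, h]
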